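-- pv_equiv track=rewrite | github.com/rio1004666/CodingTest | 2022_카카오모빌리티_신입_코딩테스트/02_마이.py | solution
-- ===== SOURCE A (Python) =====
-- from collections import defaultdict
--
-- def solution(id_list, k):
--     answer = 0
--     id_dict = defaultdict(int)
--     for record in id_list:
--         person_list = record.split()
--         person_set = set(person_list)
--         for person in person_set:
--             if id_dict[person] < k:
--                 id_dict[person] += 1
--     for name , coupon in id_dict.items():
--         answer += coupon
--     return answer
-- ===== SOURCE B (Python) =====
-- def solution(id_list, k):
--     record_sets = [set(record.split()) for record in id_list]
--     people = {person for s in record_sets for person in s}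
--     return sum(min(sum(1 for s in record_sets if person in s), k) for person in people)
-- ===== Notes on version B (the rewrite author's own statement) =====
-- stated objective: alternative
-- what changed: A is record-major: it streams records through a defaultdict counter with an interleaved 'if < k' cap; B is person-major and dict-free: it materialises the per-record sets once, collects the set of all people, and for each person counts by a membership scan over the record sets, summing min(count, k).
-- outside the precondition, e.g. on solution(['a'], -1): A returns 0, B returns -1
import Mathlib
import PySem

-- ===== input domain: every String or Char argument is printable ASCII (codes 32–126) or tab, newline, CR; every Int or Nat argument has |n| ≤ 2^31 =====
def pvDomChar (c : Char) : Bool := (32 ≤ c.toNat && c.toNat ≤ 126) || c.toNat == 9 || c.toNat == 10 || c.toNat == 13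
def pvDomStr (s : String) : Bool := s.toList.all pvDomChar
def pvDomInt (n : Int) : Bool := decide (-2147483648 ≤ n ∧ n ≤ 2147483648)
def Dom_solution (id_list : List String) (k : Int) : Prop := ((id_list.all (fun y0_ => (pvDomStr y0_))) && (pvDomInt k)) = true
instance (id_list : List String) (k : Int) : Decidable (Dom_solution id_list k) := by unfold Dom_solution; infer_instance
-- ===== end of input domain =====

-- B replaces A's record-major defaultdict counting with an interleaved cap by a dict-free
-- person-major computation: per-record sets are materialised once, and each person's record
-- count is obtained by a membership scan, capped only at summation time (alternative algorithm).


-- ===== PORT A =====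
def solution (id_list : List String) (k : Int) : Int :=
  let id_dict : PySem.Dict String Int :=
    id_list.foldl (fun id_dict record =>
      let person_list := PySem.Str.split₀ record
      let person_set := PySem.Set.ofList person_list
      person_set.foldl (fun d person =>
        let v := d.getD person 0          -- id_dict[person] on a defaultdict …
        let d := d.insert person v        -- … inserts the default for a missing key
        if v < k then d.insert person (v + 1) else d) id_dict)
      PySem.Dict.empty
  id_dict.items.foldl (fun answer pair => answer + pair.2) 0

-- ===== PORT B =====
def solution_alt (id_list : List String) (k : Int) : Int :=
  let record_sets := id_list.map (fun record => PySem.Set.ofList (PySem.Str.split₀ record))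
  let people : PySem.Set String := PySem.Set.ofList (record_sets.flatMap (fun s => s))
  -- the sum over the people set is order-independent, so the set's iteration order is immaterial
  (people.map (fun person =>
      min ((record_sets.countP (fun s => PySem.Set.contains s person) : Nat) : Int) k)).sum

-- ===== PRECONDITION & SPEC =====
-- Pre_ restricts to the natural domain of a coupon cap: k ≥ 0. For negative k, A's guard never
-- fires (it returns 0) while B sums negative minima — both values are artefacts outside the
-- problem's meaningful inputs.
def Pre_solution (id_list : List String) (k : Int) : Prop := 0 ≤ k
instance (id_list : List String) (k : Int) : Decidable (Pre_solution id_list k) := by unfold Pre_solution; infer_instance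
def pvWitness_solution : List String × Int := (["a b", "a"], 1)
def Spec_solution (id_list : List String) (k : Int) (out : Int) : Prop := out = solution_alt id_list k
instance (id_list : List String) (k : Int) (out : Int) : Decidable (Spec_solution id_list k out) := by unfold Spec_solution; infer_instance

-- ===== CLAIM (what is proved, stated in full; the proofs are below) =====
def Claim_equal_solution : Prop := ∀ (id_list : List String) (k : Int), Dom_solution id_list k → Pre_solution id_list k → Spec_solution id_list k (solution id_list k)

-- ===== LEMMAS AND PROOFS =====

-- A's dict is the uncapped counter dict with every value capped at k (same keys, same order).
def pvCap (k : Int) (p : String × Int) : String × Int := (p.1, min p.2 k)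

def pvRel (k : Int) (dA dB : PySem.Dict String Int) : Prop :=
  dA.items = dB.items.map (pvCap k)

theorem pvRel_contains {k : Int} {dA dB : PySem.Dict String Int} (h : pvRel k dA dB)
    (x : String) : dA.contains x = dB.contains x := by
  unfold pvRel at h
  simp only [PySem.Dict.contains, h, List.any_map]
  congr 1

theorem pv_find?_map (k : Int) (x : String) (l : List (String × Int)) :
    List.find? (fun p => p.1 == x) (l.map (pvCap k)) =
      (List.find? (fun p => p.1 == x) l).map (pvCap k) := by
  induction l with
  | nil => simp
  | cons p rest ih =>
      by_cases hp : p.1 == x <;> simp [pvCap, hp, ih]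

theorem pvRel_get? {k : Int} {dA dB : PySem.Dict String Int} (h : pvRel k dA dB)
    (x : String) : dA.get? x = (dB.get? x).map (fun v => min v k) := by
  unfold pvRel at h
  simp only [PySem.Dict.get?, h, pv_find?_map, Option.map_map]
  cases List.find? (fun p => p.1 == x) dB.items <;> simp [pvCap]

theorem pvRel_getD {k : Int} {dA dB : PySem.Dict String Int} (h : pvRel k dA dB)
    (hk : 0 ≤ k) (x : String) : dA.getD x 0 = min (dB.getD x 0) k := by
  simp only [PySem.Dict.getD, pvRel_get? h x]
  cases dB.get? x with
  | none => simp [min_eq_left hk]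
  | some v => simp

theorem pvRel_insert {k : Int} {dA dB : PySem.Dict String Int} (h : pvRel k dA dB)
    (x : String) (w : Int) : pvRel k (dA.insert x (min w k)) (dB.insert x w) := by
  have hcontains := pvRel_contains h x
  unfold pvRel at h ⊢
  simp only [PySem.Dict.insert, hcontains]
  by_cases hc : dB.contains x = true
  · simp only [hc, if_true, h, List.map_map]
    apply List.map_congr_left
    intro p _
    by_cases hp : p.1 == x <;> simp [pvCap, Function.comp, hp]
  · simp [hc, h, pvCap]

-- inserting twice under the same key keeps only the last value
theorem pv_insert_insert (d : PySem.Dict String Int) (x : String) (v w : Int) :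
    (d.insert x v).insert x w = d.insert x w := by
  by_cases hc : d.contains x = true
  · have hany : (d.items.any fun p => p.1 == x) = true := hc
    have hc2 : (PySem.Dict.mk (d.items.map
        (fun p => if (p.1 == x) = true then (x, v) else p))).contains x = true := by
      simp only [PySem.Dict.contains, List.any_map]
      rcases List.any_eq_true.1 hany with ⟨p, hp, hpe⟩
      refine List.any_eq_true.2 ⟨p, hp, ?_⟩
      simp only [Function.comp_apply, if_pos hpe]
      simp
    show (if d.contains x = true
            then PySem.Dict.mk (d.items.map (fun p => if (p.1 == x) = true then (x, v) else p))
            else PySem.Dict.mk (d.items ++ [(x, v)])).insert x w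
        = if d.contains x = true
            then PySem.Dict.mk (d.items.map (fun p => if (p.1 == x) = true then (x, w) else p))
            else PySem.Dict.mk (d.items ++ [(x, w)])
    rw [if_pos hc, if_pos hc]
    show (if (PySem.Dict.mk (d.items.map (fun p => if (p.1 == x) = true then (x, v) else p))).contains x = true
            then PySem.Dict.mk ((d.items.map (fun p => if (p.1 == x) = true then (x, v) else p)).map
                   (fun p => if (p.1 == x) = true then (x, w) else p))
            else PySem.Dict.mk ((d.items.map (fun p => if (p.1 == x) = true then (x, v) else p)) ++ [(x, w)]))
        = PySem.Dict.mk (d.items.map (fun p => if (p.1 == x) = true then (x, w) else p))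
    rw [if_pos hc2]
    congr 1
    rw [List.map_map]
    apply List.map_congr_left
    intro p _
    by_cases hp : p.1 == x <;> simp [Function.comp, hp]
  · have hfc : ∀ p ∈ d.items, (p.1 == x) = false := by
      intro p hp
      by_contra hpe
      exact hc (List.any_eq_true.2 ⟨p, hp, by simpa using hpe⟩)
    have hc2 : (PySem.Dict.mk (d.items ++ [(x, v)])).contains x = true := by
      simp [PySem.Dict.contains]
    show (if d.contains x = true
            then PySem.Dict.mk (d.items.map (fun p => if (p.1 == x) = true then (x, v) else p))
            else PySem.Dict.mk (d.items ++ [(x, v)])).insert x w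
        = if d.contains x = true
            then PySem.Dict.mk (d.items.map (fun p => if (p.1 == x) = true then (x, w) else p))
            else PySem.Dict.mk (d.items ++ [(x, w)])
    rw [if_neg hc, if_neg hc]
    show (if (PySem.Dict.mk (d.items ++ [(x, v)])).contains x = true
            then PySem.Dict.mk ((d.items ++ [(x, v)]).map (fun p => if (p.1 == x) = true then (x, w) else p))
            else PySem.Dict.mk ((d.items ++ [(x, v)]) ++ [(x, w)]))
        = PySem.Dict.mk (d.items ++ [(x, w)])
    rw [if_pos hc2]
    congr 1
    rw [List.map_append]
    congr 1
    · conv_rhs => rw [← List.map_id d.items]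
      apply List.map_congr_left
      intro p hp
      simp [hfc p hp]
    · simp

-- the per-person step of A matches a plain counter increment
theorem pvRel_step {k : Int} (hk : 0 ≤ k) {dA dB : PySem.Dict String Int}
    (h : pvRel k dA dB) (person : String) :
    pvRel k
      (if dA.getD person 0 < k
        then (dA.insert person (dA.getD person 0)).insert person (dA.getD person 0 + 1)
        else dA.insert person (dA.getD person 0))
      (dB.insert person (dB.getD person 0 + 1)) := by
  have hv : dA.getD person 0 = min (dB.getD person 0) k := pvRel_getD h hk person
  by_cases hck : dB.getD person 0 < k
  · have hlt : dA.getD person 0 < k := by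
      rw [hv]; exact lt_of_le_of_lt (min_le_left _ _) hck
    rw [if_pos hlt, hv, min_eq_left hck.le]
    have h1 := pvRel_insert h person (dB.getD person 0)
    rw [min_eq_left hck.le] at h1
    have h2 := pvRel_insert h1 person (dB.getD person 0 + 1)
    rw [min_eq_left (by omega : dB.getD person 0 + 1 ≤ k)] at h2
    rw [← pv_insert_insert dB person (dB.getD person 0) (dB.getD person 0 + 1)]
    exact h2
  · have hge : k ≤ dB.getD person 0 := le_of_not_gt hck
    have hlt : ¬ dA.getD person 0 < k := by
      rw [hv, min_eq_right hge]; exact lt_irrefl k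
    rw [if_neg hlt, hv, min_eq_right hge]
    have h1 := pvRel_insert h person (dB.getD person 0 + 1)
    rwa [min_eq_right (by omega : k ≤ dB.getD person 0 + 1)] at h1

theorem pvRel_foldl_persons {k : Int} (hk : 0 ≤ k) (ps : List String)
    {dA dB : PySem.Dict String Int} (h : pvRel k dA dB) :
    pvRel k
      (ps.foldl (fun d person =>
        let v := d.getD person 0
        let d := d.insert person v
        if v < k then d.insert person (v + 1) else d) dA)
      (ps.foldl (fun c person => c.modify person 0 (· + 1)) dB) := by
  induction ps generalizing dA dB with
  | nil => exact h
  | cons p rest ih => exact ih (pvRel_step hk h p)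

theorem pvRel_foldl_records {k : Int} (hk : 0 ≤ k) (id_list : List String)
    {dA dB : PySem.Dict String Int} (h : pvRel k dA dB) :
    pvRel k
      (id_list.foldl (fun id_dict record =>
        let person_list := PySem.Str.split₀ record
        let person_set := PySem.Set.ofList person_list
        person_set.foldl (fun d person =>
          let v := d.getD person 0
          let d := d.insert person v
          if v < k then d.insert person (v + 1) else d) id_dict) dA)
      (id_list.foldl (fun counts record =>
        (PySem.Set.ofList (PySem.Str.split₀ record)).foldl
          (fun c person => c.modify person 0 (· + 1)) counts) dB) := by
  induction id_list generalizing dA dB with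
  | nil => exact h
  | cons r rest ih => exact ih (pvRel_foldl_persons hk _ h)

theorem pv_sum_items_aux (l : List (String × Int)) (a : Int) :
    l.foldl (fun answer pair => answer + pair.2) a = a + (l.map (·.2)).sum := by
  induction l generalizing a with
  | nil => simp
  | cons p rest ih => simp [List.foldl_cons, ih, add_assoc]

theorem pv_sum_items (l : List (String × Int)) :
    l.foldl (fun answer pair => answer + pair.2) 0 = (l.map (·.2)).sum := by
  simpa using pv_sum_items_aux l 0

-- A's nested counter loop IS the counter of the flattened per-record sets
theorem pv_counts_eq_counter (id_list : List String) :
    id_list.foldl (fun counts record =>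
      (PySem.Set.ofList (PySem.Str.split₀ record)).foldl
        (fun c person => c.modify person 0 (· + 1)) counts) PySem.Dict.empty
    = PySem.Dict.counter
        ((id_list.map (fun record => PySem.Set.ofList (PySem.Str.split₀ record))).flatten) := by
  rw [PySem.Dict.counter_eq_foldl, List.foldl_flatten, List.foldl_map]

-- counting occurrences in the flattened duplicate-free sets = counting the sets containing p
theorem pv_count_flatten (ls : List (List String)) (hnd : ∀ s ∈ ls, s.Nodup) (p : String) :
    ls.flatten.count p = ls.countP (fun s => decide (p ∈ s)) := by
  induction ls with
  | nil => simp
  | cons s rest ih =>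
      have hs : s.Nodup := hnd s (List.mem_cons_self)
      have hrest := ih (fun t ht => hnd t (List.mem_cons_of_mem _ ht))
      by_cases hp : p ∈ s
      · simp [List.count_append, List.count_eq_one_of_mem hs hp, hrest, hp]
        omega
      · simp [List.count_append, List.count_eq_zero_of_not_mem hp, hrest, hp]

-- ===== VERDICT (by name: the statement is the Claim_ definition above) =====
theorem solution_spec : Claim_equal_solution := by
  intro id_list k _ hk
  unfold Spec_solution solution solution_alt
  have h0 : pvRel k (PySem.Dict.empty : PySem.Dict String Int) PySem.Dict.empty := by
    simp [pvRel, PySem.Dict.empty]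
  have h := pvRel_foldl_records hk id_list h0
  unfold pvRel at h
  rw [pv_counts_eq_counter] at h
  have hnd : ∀ s ∈ id_list.map (fun record => PySem.Set.ofList (PySem.Str.split₀ record)), s.Nodup := by
    intro s hs
    rcases List.mem_map.1 hs with ⟨r, _, rfl⟩
    exact PySem.Set.nodup_ofList _
  rw [pv_sum_items, h, PySem.Dict.items_counter]
  simp only [List.flatMap_id', List.map_map]
  apply congrArg List.sum
  apply List.map_congr_left
  intro p _
  simp [pvCap, Function.comp, pv_count_flatten _ hnd p, PySem.Set.contains]
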